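-- pv_equiv track=rewrite | github.com/pypi-data/pypi-mirror-336 | packages/taxon2wikipedia/taxon2wikipedia-0.1.0-py3-none-any.whl/taxon2wikipedia/helper.py | render_list_without_dict
-- ===== SOURCE A (Python) =====
-- def render_list_without_dict(list_of_names):
--     text = ""
--     for i, name in enumerate(list_of_names):
--         if i == 0:
--             text += name
--         elif i == len(list_of_names) - 1:
--             text += " e " + name
--         else:
--             text += ", " + name
--     return text
-- ===== SOURCE B (Python) =====
-- def render_list_without_dict(list_of_names):
--     if not list_of_names:
--         return ""
--     head, last = list_of_names[:-1], list_of_names[-1]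
--     if not head:
--         return last
--     return ", ".join(head) + " e " + last
-- ===== Notes on version B (the rewrite author's own statement) =====
-- stated objective: simpler
-- what changed: Replaces the indexed enumerate loop with per-element three-way branching by a split into all-but-last joined once with ', ' plus ' e ' and the last element.
import Mathlib
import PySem

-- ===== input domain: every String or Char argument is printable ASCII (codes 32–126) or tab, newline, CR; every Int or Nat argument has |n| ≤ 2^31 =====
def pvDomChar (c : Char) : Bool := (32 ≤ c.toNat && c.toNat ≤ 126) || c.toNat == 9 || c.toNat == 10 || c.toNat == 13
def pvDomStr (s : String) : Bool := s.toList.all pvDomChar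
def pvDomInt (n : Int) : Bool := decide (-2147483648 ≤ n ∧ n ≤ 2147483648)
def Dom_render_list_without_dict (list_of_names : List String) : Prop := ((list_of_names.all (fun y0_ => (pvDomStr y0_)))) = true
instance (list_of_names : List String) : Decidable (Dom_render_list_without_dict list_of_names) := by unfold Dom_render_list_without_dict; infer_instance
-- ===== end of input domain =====

-- B replaces A's indexed loop with a join of all-but-last plus " e " plus the last element (simpler decomposition; same cost).

-- ===== PORT A =====
def render_list_without_dict (list_of_names : List String) : String :=
  (PySem.List.enumerate list_of_names 0).foldl
    (fun text p =>
      if p.1 = 0 then text ++ p.2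
      else if p.1 = (list_of_names.length : Int) - 1 then text ++ " e " ++ p.2
      else text ++ ", " ++ p.2)
    ""

-- ===== PORT B =====
def render_list_without_dict_alt (list_of_names : List String) : String :=
  match list_of_names with
  | [] => ""
  | _ :: _ =>
    let head := PySem.List.slice list_of_names none (some (-1))   -- list_of_names[:-1]
    let last := PySem.List.pyGetD list_of_names (-1) ""           -- list_of_names[-1] (list nonempty here)
    if head = [] then last
    else PySem.Str.join ", " head ++ " e " ++ last

-- ===== PRECONDITION & SPEC =====
def Spec_render_list_without_dict (list_of_names : List String) (out : String) : Prop := out = render_list_without_dict_alt list_of_names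
instance (list_of_names : List String) (out : String) : Decidable (Spec_render_list_without_dict list_of_names out) := by unfold Spec_render_list_without_dict; infer_instance

-- ===== CLAIM (what is proved, stated in full; the proofs are below) =====
def Claim_equal_render_list_without_dict : Prop := ∀ (list_of_names : List String), Dom_render_list_without_dict list_of_names → Spec_render_list_without_dict list_of_names (render_list_without_dict list_of_names)

-- ===== LEMMAS AND PROOFS =====

/-- The text contributed by all elements after the first, in A's rendering. -/
def pvTailStr : List String → String
  | [] => ""
  | [y] => " e " ++ y
  | y :: ys => ", " ++ y ++ pvTailStr ys

theorem pvFoldA (N : Int) (xs : List String) : ∀ (i : Int) (t : String),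
    1 ≤ i → i + xs.length = N →
    (PySem.List.enumerate xs i).foldl
      (fun text p =>
        if p.1 = 0 then text ++ p.2
        else if p.1 = N - 1 then text ++ " e " ++ p.2
        else text ++ ", " ++ p.2) t = t ++ pvTailStr xs := by
  induction xs with
  | nil => intro i t _ _; simp [PySem.List.enumerate, pvTailStr]
  | cons y ys ih =>
    intro i t hi hN
    rw [PySem.List.enumerate_cons]
    cases ys with
    | nil =>
      have h1 : i ≠ 0 := by omega
      have h2 : i = N - 1 := by simp at hN; omega
      have h3 : N - 1 ≠ 0 := by omega
      simp [PySem.List.enumerate, pvTailStr, h2, h3, String.append_assoc]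
    | cons z zs =>
      have h1 : i ≠ 0 := by omega
      have h2 : i ≠ N - 1 := by simp at hN; omega
      have hN' : (i + 1) + ((z :: zs).length : Int) = N := by simp at hN ⊢; omega
      simp only [List.foldl_cons, if_neg h1, if_neg h2]
      rw [ih (i + 1) (t ++ ", " ++ y) (by omega) hN']
      simp [pvTailStr, String.append_assoc]

theorem pvA_cons (x : String) (xs : List String) :
    render_list_without_dict (x :: xs) = x ++ pvTailStr xs := by
  unfold render_list_without_dict
  rw [PySem.List.enumerate_cons]
  have h := pvFoldA (((x :: xs).length : Int)) xs 1 ("" ++ x) (by omega)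
    (by simp; omega)
  simp only [List.foldl_cons] at *
  norm_num at h ⊢
  exact h

theorem pvJoin_cons_cons (p q : String) (rest : List String) :
    PySem.Str.join ", " (p :: q :: rest) = p ++ ", " ++ PySem.Str.join ", " (q :: rest) := by
  apply String.toList_inj.mp
  simp [PySem.Str.toList_join, PySem.Chars.join_cons_cons]

theorem pvJoin_singleton (p : String) : PySem.Str.join ", " [p] = p := by
  apply String.toList_inj.mp
  simp [PySem.Str.toList_join, PySem.Chars.join_singleton]

theorem pvB_cons (x : String) (xs : List String) :
    render_list_without_dict_alt (x :: xs) = x ++ pvTailStr xs := by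
  induction xs generalizing x with
  | nil =>
    simp [render_list_without_dict_alt, PySem.List.slice_to_neg_one,
      PySem.List.pyGetD_neg_one, pvTailStr]
  | cons y ys ih =>
    cases ys with
    | nil =>
      simp [render_list_without_dict_alt, PySem.List.slice_to_neg_one,
        PySem.List.pyGetD_neg_one, pvTailStr, pvJoin_singleton, String.append_assoc]
    | cons z zs =>
      have hB := ih y
      simp only [render_list_without_dict_alt, PySem.List.slice_to_neg_one,
        List.dropLast_cons₂] at hB ⊢
      have hlast : PySem.List.pyGetD (x :: y :: z :: zs) (-1) ""
          = PySem.List.pyGetD (y :: z :: zs) (-1) "" := by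
        rw [PySem.List.pyGetD_neg_one (x :: y :: z :: zs) "" (List.cons_ne_nil _ _),
            PySem.List.pyGetD_neg_one (y :: z :: zs) "" (List.cons_ne_nil _ _),
            List.getLast_cons]
      rw [if_neg (by simp), hlast, pvJoin_cons_cons]
      rw [if_neg (by simp)] at hB
      calc (x ++ ", " ++ PySem.Str.join ", " (y :: (z :: zs).dropLast)) ++ " e "
              ++ PySem.List.pyGetD (y :: z :: zs) (-1) ""
          = x ++ ", " ++ (PySem.Str.join ", " (y :: (z :: zs).dropLast) ++ " e "
              ++ PySem.List.pyGetD (y :: z :: zs) (-1) "") := by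
            simp [String.append_assoc]
        _ = x ++ ", " ++ (y ++ pvTailStr (z :: zs)) := by rw [hB]
        _ = x ++ pvTailStr (y :: z :: zs) := by simp [pvTailStr, String.append_assoc]

-- ===== VERDICT (by name: the statement is the Claim_ definition above) =====
theorem render_list_without_dict_spec : Claim_equal_render_list_without_dict := by
  intro l _
  unfold Spec_render_list_without_dict
  cases l with
  | nil => rfl
  | cons x xs => rw [pvA_cons, pvB_cons]
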